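-- pv_equiv track=rewrite | github.com/jeyriku/pyats-jeyws01 | jeypyats/utils/utils.py | dict_intersection
-- ===== SOURCE A (Python) =====
-- def dict_intersection(dict1, dict2):
--     """
--     Compute the intersection of two dictionaries, including nested dictionaries.
--     This function returns a new dictionary that contains only the key-value pairs
--     that are present in both input dictionaries. If the values corresponding to a
--     common key are dictionaries themselves, the function will recursively compute
--     the intersection of these nested dictionaries.
--     Args:
--         dict1 (dict): The first dictionary.
--         dict2 (dict): The second dictionary.
--     Returns:
--         dict: A dictionary containing the intersection of the two input dictionaries.
--               Only key-value pairs that are present in both dictionaries and have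
--               the same value are included in the result. For nested dictionaries,
--               the intersection is computed recursively.
--     """
--
--     def recursive_intersection(d1, d2):
--         common_keys = d1.keys() & d2.keys()
--         intersection = {}
--         for key in common_keys:
--             if isinstance(d1[key], dict) and isinstance(d2[key], dict):
--                 intersection[key] = recursive_intersection(d1[key], d2[key])
--             elif d1[key] == d2[key]:
--                 intersection[key] = d1[key]
--         return intersection
--
--     return recursive_intersection(dict1, dict2)
-- ===== SOURCE B (Python) =====
-- def dict_intersection(dict1, dict2):
--     # Sort both item lists by key and intersect them with a two-pointer merge
--     # (recursing when both values at an equal key are dicts), then build the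
--     # result dict from the merged pairs.
--     def merge(a, b):
--         pairs = []
--         i = j = 0
--         while i < len(a) and j < len(b):
--             k1, v1 = a[i]
--             k2, v2 = b[j]
--             if k1 < k2:
--                 i += 1
--             elif k2 < k1:
--                 j += 1
--             else:
--                 if isinstance(v1, dict) and isinstance(v2, dict):
--                     pairs.append((k1, dict_intersection(v1, v2)))
--                 elif v1 == v2:
--                     pairs.append((k1, v1))
--                 i += 1
--                 j += 1
--         return pairs
--
--     return dict(merge(sorted(dict1.items(), key=lambda p: p[0]),
--                       sorted(dict2.items(), key=lambda p: p[0])))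
-- ===== Notes on version B (the rewrite author's own statement) =====
-- stated objective: alternative
-- what changed: B replaces A's hash-based key-set intersection plus per-key lookups with a sort-then-two-pointer merge: both item lists are sorted by key and walked in lockstep, emitting a pair when the keys meet and the values agree (recursing on nested dicts), and the result dict is built from the merged pair list at the end.
import Mathlib
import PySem

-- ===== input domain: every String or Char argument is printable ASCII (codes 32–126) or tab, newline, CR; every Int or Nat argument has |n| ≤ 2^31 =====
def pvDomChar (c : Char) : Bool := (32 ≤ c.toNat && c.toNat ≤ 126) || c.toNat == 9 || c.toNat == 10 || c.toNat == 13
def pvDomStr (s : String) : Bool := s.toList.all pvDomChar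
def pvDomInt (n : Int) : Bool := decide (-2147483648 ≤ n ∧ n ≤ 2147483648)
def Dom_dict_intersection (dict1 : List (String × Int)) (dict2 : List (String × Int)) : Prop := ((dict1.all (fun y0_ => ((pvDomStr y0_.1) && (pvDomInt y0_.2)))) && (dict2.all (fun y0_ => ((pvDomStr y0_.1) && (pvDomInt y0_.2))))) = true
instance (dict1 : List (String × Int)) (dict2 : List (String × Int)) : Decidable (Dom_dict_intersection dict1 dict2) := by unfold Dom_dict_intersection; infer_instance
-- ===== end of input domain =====

-- Header: B replaces A's hash-set key intersection + per-key lookups by sorting both item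
-- lists by key and intersecting them with a two-pointer merge (alternative algorithm).

-- ===== PORT A =====
-- recursive_intersection transliterated at the ported type String → Int: values are Int, so
-- both isinstance(..., dict) tests are always False and only the '==' branch can fire.
-- Python iterates the set 'd1.keys() & d2.keys()' in unspecified hash order and the output
-- dict's insertion order inherits it; dict outputs are compared ignoring order, so the port
-- fixes that unspecified iteration order as sorted.
def dict_intersection (dict1 : List (String × Int)) (dict2 : List (String × Int)) : List (String × Int) :=
  let d1 := PySem.Dict.ofList dict1
  let d2 := PySem.Dict.ofList dict2
  let common := PySem.List.sorted
    (PySem.Set.inter (PySem.Set.ofList d1.keys) (PySem.Set.ofList d2.keys)) (fun k => k) false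
  (common.foldl (fun acc k =>
      if d1.getD k 0 == d2.getD k 0 then acc.insert k (d1.getD k 0) else acc)
    PySem.Dict.empty).items

-- ===== PORT B =====
-- Source B's merge loop over the two key-sorted item lists: advance the side with the smaller
-- key; on equal keys (values are Int here, so the isinstance-dict branch of Source B is always
-- False) keep the pair iff the values agree.
def pvMerge : List (String × Int) → List (String × Int) → List (String × Int)
  | [], _ => []
  | _ :: _, [] => []
  | (k1, v1) :: as, (k2, v2) :: bs =>
    if k1 < k2 then pvMerge as ((k2, v2) :: bs)
    else if k2 < k1 then pvMerge ((k1, v1) :: as) bs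
    else if v1 == v2 then (k1, v1) :: pvMerge as bs
    else pvMerge as bs
termination_by a b => a.length + b.length

-- dict(merge(sorted(dict1.items(), key=fst), sorted(dict2.items(), key=fst)))
def dict_intersection_alt (dict1 : List (String × Int)) (dict2 : List (String × Int)) : List (String × Int) :=
  (PySem.Dict.ofList (pvMerge
    (PySem.List.sorted (PySem.Dict.ofList dict1).items (fun p => p.1) false)
    (PySem.List.sorted (PySem.Dict.ofList dict2).items (fun p => p.1) false))).items

-- ===== PRECONDITION & SPEC =====
def Spec_dict_intersection (dict1 : List (String × Int)) (dict2 : List (String × Int)) (out : List (String × Int)) : Prop := out = dict_intersection_alt dict1 dict2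
instance (dict1 : List (String × Int)) (dict2 : List (String × Int)) (out : List (String × Int)) : Decidable (Spec_dict_intersection dict1 dict2 out) := by unfold Spec_dict_intersection; infer_instance

-- ===== CLAIM (what is proved, stated in full; the proofs are below) =====
def Claim_equal_dict_intersection : Prop := ∀ (dict1 : List (String × Int)) (dict2 : List (String × Int)), Dom_dict_intersection dict1 dict2 → Spec_dict_intersection dict1 dict2 (dict_intersection dict1 dict2)

-- ===== LEMMAS AND PROOFS =====

-- ≤ on keys plus distinct keys gives strict < on keys
lemma pvPairwiseLt {l : List (String × Int)}
    (h : l.Pairwise (fun a b => a.1 ≤ b.1)) (hn : (l.map Prod.fst).Nodup) :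
    l.Pairwise (fun a b => a.1 < b.1) := by
  have hne : l.Pairwise (fun a b => a.1 ≠ b.1) := List.pairwise_map.mp hn
  exact (h.and hne).imp (fun ⟨hle, hne⟩ => lt_of_le_of_ne hle hne)

lemma pvLookupNoneOfLt {b : List (String × Int)} {k : String}
    (h : ∀ p ∈ b, k < p.1) : List.lookup k b = none := by
  induction b with
  | nil => rfl
  | cons q bs ih =>
    obtain ⟨kq, vq⟩ := q
    have hk : k ≠ kq := ne_of_lt (h _ (List.mem_cons_self))
    simp only [List.lookup_cons, beq_eq_false_iff_ne.mpr hk]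
    exact ih (fun p hp => h p (List.mem_cons_of_mem _ hp))

lemma pvLookupConsNe {bs : List (String × Int)} {k k2 : String} {v2 : Int}
    (h : k ≠ k2) : List.lookup k ((k2, v2) :: bs) = List.lookup k bs := by
  simp [List.lookup_cons, beq_eq_false_iff_ne.mpr h]

-- merge of two strictly key-sorted lists is the lookup filter over the first list
lemma pvMerge_eq_filter : ∀ (a b : List (String × Int)),
    a.Pairwise (fun p q => p.1 < q.1) → b.Pairwise (fun p q => p.1 < q.1) →
    pvMerge a b = a.filter (fun p => List.lookup p.1 b == some p.2) := by
  intro a b ha hb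
  fun_induction pvMerge a b with
  | case1 b => simp
  | case2 a as => simp [List.lookup_nil]
  | case3 k1 v1 as k2 v2 bs hlt ih =>
    rw [List.filter_cons_of_neg, ih ha.tail hb]
    have : List.lookup k1 ((k2, v2) :: bs) = none := by
      refine pvLookupNoneOfLt ?_
      intro p hp
      rcases List.mem_cons.mp hp with h | h
      · rw [h]; exact hlt
      · exact lt_trans hlt (List.rel_of_pairwise_cons hb h)
    simp [this]
  | case4 k1 v1 as k2 v2 bs hlt hgt ih =>
    rw [ih ha hb.tail]
    refine (List.filter_congr ?_).symm
    intro p hp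
    have hne : p.1 ≠ k2 := by
      rcases List.mem_cons.mp hp with h | h
      · rw [h]; exact (ne_of_gt hgt)
      · exact ne_of_gt (lt_trans hgt (List.rel_of_pairwise_cons ha h))
    rw [pvLookupConsNe hne]
  | case5 k1 v1 as k2 v2 bs hlt hgt heq ih =>
    have hk : k1 = k2 := le_antisymm (not_lt.mp hgt) (not_lt.mp hlt)
    rw [List.filter_cons_of_pos, ih ha.tail hb.tail]
    · congr 1
      refine List.filter_congr ?_
      intro p hp
      have : p.1 ≠ k2 := by
        rw [← hk]; exact ne_of_gt (List.rel_of_pairwise_cons ha hp)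
      rw [pvLookupConsNe this]
    · subst hk
      have hv : v1 = v2 := beq_iff_eq.mp heq
      subst hv
      simp
  | case6 k1 v1 as k2 v2 bs hlt hgt hne ih =>
    have hk : k1 = k2 := le_antisymm (not_lt.mp hgt) (not_lt.mp hlt)
    rw [List.filter_cons_of_neg, ih ha.tail hb.tail]
    · refine List.filter_congr ?_
      intro p hp
      have : p.1 ≠ k2 := by
        rw [← hk]; exact ne_of_gt (List.rel_of_pairwise_cons ha hp)
      rw [pvLookupConsNe this]
    · subst hk
      have hv : v1 ≠ v2 := fun h => hne (beq_iff_eq.mpr h)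
      simp
      exact fun h => hv h.symm

lemma pvLookupNone {l : List (String × Int)} {k : String} :
    List.lookup k l = none ↔ k ∉ l.map Prod.fst := by
  induction l with
  | nil => simp
  | cons q l ih =>
    obtain ⟨kq, vq⟩ := q
    by_cases h : k = kq
    · subst h; simp
    · simp [List.lookup_cons, beq_eq_false_iff_ne.mpr h, ih, h]

lemma pvLookupSome {l : List (String × Int)} {k : String} {v : Int}
    (hn : (l.map Prod.fst).Nodup) :
    List.lookup k l = some v ↔ (k, v) ∈ l := by
  induction l with
  | nil => simp
  | cons q l ih =>
    obtain ⟨kq, vq⟩ := q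
    by_cases h : k = kq
    · subst h
      simp only [List.lookup_cons, beq_self_eq_true, List.mem_cons, Option.some.injEq]
      constructor
      · rintro h; exact Or.inl (by simp [h.symm])
      · rintro (h | h)
        · simp [(Prod.mk.injEq .. ▸ h : _ ∧ _).2]
        · exact absurd (List.mem_map_of_mem (f := Prod.fst) h) (by simpa using (List.nodup_cons.mp hn).1)
    · simp only [List.lookup_cons, beq_eq_false_iff_ne.mpr h, List.mem_cons]
      rw [ih (List.nodup_cons.mp hn).2]
      simp [Prod.ext_iff, h]

-- building a dict from a list with distinct keys keeps the list as items
lemma pvItemsOfList (l : List (String × Int)) (h : (l.map Prod.fst).Nodup) :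
    (PySem.Dict.ofList l).items = l := by
  show (PySem.Dict.update PySem.Dict.empty l).items = l
  unfold PySem.Dict.update
  rw [PySem.Dict.items_foldl_insert_fresh l (fun p => p.1) (fun p => p.2) PySem.Dict.empty
    (fun a _ => PySem.Dict.contains_empty _) h]
  show [] ++ _ = _
  simp

-- lookup in any nodup-keys permutation of d.items is d.get?
lemma pvLookupPerm (d : PySem.Dict String Int) (l : List (String × Int))
    (hp : l.Perm d.items) (hnd : d.keys.Nodup) (k : String) :
    List.lookup k l = d.get? k := by
  have hnl : (l.map Prod.fst).Nodup := ((hp.map Prod.fst).nodup_iff).mpr hnd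
  cases hg : d.get? k with
  | none =>
    rw [pvLookupNone]
    intro hm
    exact (PySem.Dict.get?_eq_none_iff_not_mem_keys d k).mp hg
      ((hp.map Prod.fst).mem_iff.mp hm)
  | some v =>
    rw [pvLookupSome hnl]
    exact hp.mem_iff.mpr ((PySem.Dict.get?_eq_some_iff_mem_items d k v hnd).mp hg)

-- ---- A-side characterisation ----

lemma pvCommonNodup (dict1 dict2 : List (String × Int)) :
    (PySem.List.sorted (PySem.Set.inter (PySem.Set.ofList (PySem.Dict.ofList dict1).keys)
      (PySem.Set.ofList (PySem.Dict.ofList dict2).keys)) (fun k => k) false).Nodup :=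
  (PySem.List.sorted_perm _ _ _).nodup_iff.mpr
    ((PySem.Set.nodup_ofList _).filter _)

lemma pvAeq (dict1 dict2 : List (String × Int)) :
    dict_intersection dict1 dict2 =
      ((PySem.List.sorted (PySem.Set.inter (PySem.Set.ofList (PySem.Dict.ofList dict1).keys)
          (PySem.Set.ofList (PySem.Dict.ofList dict2).keys)) (fun k => k) false).filter
        (fun k => (PySem.Dict.ofList dict1).getD k 0 == (PySem.Dict.ofList dict2).getD k 0)).map
        (fun k => (k, (PySem.Dict.ofList dict1).getD k 0)) := by
  unfold dict_intersection
  simp only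
  rw [PySem.List.foldl_if_eq_foldl_filter]
  rw [PySem.Dict.items_foldl_insert_fresh _ (fun x => x) (fun x => (PySem.Dict.ofList dict1).getD x 0)
    PySem.Dict.empty (fun a _ => PySem.Dict.contains_empty _)
    (by simpa using (pvCommonNodup dict1 dict2).filter _)]
  show [] ++ _ = _
  simp

lemma pvMemCommon (dict1 dict2 : List (String × Int)) (k : String) :
    k ∈ PySem.List.sorted (PySem.Set.inter (PySem.Set.ofList (PySem.Dict.ofList dict1).keys)
      (PySem.Set.ofList (PySem.Dict.ofList dict2).keys)) (fun k => k) false ↔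
    k ∈ (PySem.Dict.ofList dict1).keys ∧ k ∈ (PySem.Dict.ofList dict2).keys := by
  rw [(PySem.List.sorted_perm _ _ _).mem_iff]
  show k ∈ List.filter _ _ ↔ _
  rw [List.mem_filter, PySem.Set.mem_ofList]
  constructor
  · rintro ⟨h1, h2⟩
    exact ⟨h1, (PySem.Set.mem_ofList _ _).mp (by simpa [PySem.Set.contains, List.elem_iff] using h2)⟩
  · rintro ⟨h1, h2⟩
    exact ⟨h1, by simpa [PySem.Set.contains, List.elem_iff] using (PySem.Set.mem_ofList _ _).mpr h2⟩

lemma pvGetSome (d : PySem.Dict String Int) (k : String) (h : k ∈ d.keys) :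
    d.get? k = some (d.getD k 0) := by
  cases hg : d.get? k with
  | none => exact absurd ((PySem.Dict.get?_eq_none_iff_not_mem_keys d k).mp hg) (by simpa using h)
  | some v => rw [PySem.Dict.getD_of_get?_eq_some d 0 hg]

lemma pvMemA (dict1 dict2 : List (String × Int)) (p : String × Int) :
    p ∈ dict_intersection dict1 dict2 ↔
      p ∈ (PySem.Dict.ofList dict1).items ∧ p ∈ (PySem.Dict.ofList dict2).items := by
  rw [pvAeq, List.mem_map]
  set d1 := PySem.Dict.ofList dict1 with hd1
  set d2 := PySem.Dict.ofList dict2 with hd2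
  have hn1 : d1.keys.Nodup := PySem.Dict.nodup_keys_ofList _
  have hn2 : d2.keys.Nodup := PySem.Dict.nodup_keys_ofList _
  constructor
  · rintro ⟨k, hk, rfl⟩
    rw [List.mem_filter, pvMemCommon] at hk
    obtain ⟨⟨hk1, hk2⟩, heq⟩ := hk
    refine ⟨(PySem.Dict.get?_eq_some_iff_mem_items d1 k _ hn1).mp (pvGetSome d1 k hk1), ?_⟩
    have : d1.getD k 0 = d2.getD k 0 := by simpa using heq
    rw [this]
    exact (PySem.Dict.get?_eq_some_iff_mem_items d2 k _ hn2).mp (pvGetSome d2 k hk2)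
  · rintro ⟨h1, h2⟩
    obtain ⟨k, v⟩ := p
    have hk1 : k ∈ d1.keys := PySem.Dict.mem_keys_of_mem_items _ h1
    have hk2 : k ∈ d2.keys := PySem.Dict.mem_keys_of_mem_items _ h2
    have hv1 : d1.getD k 0 = v := PySem.Dict.getD_of_mem_items d1 h1 hn1 0
    have hv2 : d2.getD k 0 = v := PySem.Dict.getD_of_mem_items d2 h2 hn2 0
    refine ⟨k, ?_, by rw [hv1]⟩
    rw [List.mem_filter, pvMemCommon]
    exact ⟨⟨hk1, hk2⟩, by simp [hv1, hv2]⟩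

lemma pvPairwiseA (dict1 dict2 : List (String × Int)) :
    (dict_intersection dict1 dict2).Pairwise (fun p q => p.1 < q.1) := by
  rw [pvAeq]
  rw [List.pairwise_map]
  refine List.Pairwise.filter _ ?_
  have hle := PySem.List.sorted_pairwise (PySem.Set.inter
    (PySem.Set.ofList (PySem.Dict.ofList dict1).keys)
    (PySem.Set.ofList (PySem.Dict.ofList dict2).keys)) (fun k => k)
  have hne : (PySem.List.sorted _ (fun k : String => k) false).Nodup := pvCommonNodup dict1 dict2
  exact (hle.and hne).imp (fun ⟨h1, h2⟩ => lt_of_le_of_ne h1 h2)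

-- ---- B-side characterisation ----

lemma pvSortedKeysNodup (dct : List (String × Int)) :
    ((PySem.List.sorted (PySem.Dict.ofList dct).items (fun p => p.1) false).map Prod.fst).Nodup :=
  (((PySem.List.sorted_perm (PySem.Dict.ofList dct).items (fun p => p.1) false).map Prod.fst).nodup_iff).mpr
    (PySem.Dict.nodup_keys_ofList dct)

lemma pvSortedPairwise (dct : List (String × Int)) :
    (PySem.List.sorted (PySem.Dict.ofList dct).items (fun p => p.1) false).Pairwise
      (fun p q => p.1 < q.1) :=
  pvPairwiseLt (PySem.List.sorted_pairwise _ _) (pvSortedKeysNodup dct)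

lemma pvBeq (dict1 dict2 : List (String × Int)) :
    dict_intersection_alt dict1 dict2 =
      (PySem.List.sorted (PySem.Dict.ofList dict1).items (fun p => p.1) false).filter
        (fun p => (PySem.Dict.ofList dict2).get? p.1 == some p.2) := by
  unfold dict_intersection_alt
  rw [pvMerge_eq_filter _ _ (pvSortedPairwise dict1) (pvSortedPairwise dict2)]
  have hlk : ∀ p : String × Int,
      (List.lookup p.1 (PySem.List.sorted (PySem.Dict.ofList dict2).items (fun p => p.1) false)
        == some p.2)
      = ((PySem.Dict.ofList dict2).get? p.1 == some p.2) := by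
    intro p
    rw [pvLookupPerm (PySem.Dict.ofList dict2) _ (PySem.List.sorted_perm _ _ _)
      (PySem.Dict.nodup_keys_ofList dict2)]
  rw [List.filter_congr (fun p _ => hlk p)]
  exact pvItemsOfList _ ((List.filter_sublist.map Prod.fst).nodup (pvSortedKeysNodup dict1))

lemma pvMemB (dict1 dict2 : List (String × Int)) (p : String × Int) :
    p ∈ dict_intersection_alt dict1 dict2 ↔
      p ∈ (PySem.Dict.ofList dict1).items ∧ p ∈ (PySem.Dict.ofList dict2).items := by
  rw [pvBeq, List.mem_filter, (PySem.List.sorted_perm _ _ _).mem_iff]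
  obtain ⟨k, v⟩ := p
  rw [show ((PySem.Dict.ofList dict2).get? (k, v).1 == some (k, v).2) = true ↔
      (PySem.Dict.ofList dict2).get? k = some v from beq_iff_eq]
  rw [PySem.Dict.get?_eq_some_iff_mem_items _ _ _ (PySem.Dict.nodup_keys_ofList dict2)]

lemma pvPairwiseB (dict1 dict2 : List (String × Int)) :
    (dict_intersection_alt dict1 dict2).Pairwise (fun p q => p.1 < q.1) := by
  rw [pvBeq]
  exact (pvSortedPairwise dict1).filter _

lemma pvNodupOfPairwise {l : List (String × Int)}
    (h : l.Pairwise (fun p q => p.1 < q.1)) : l.Nodup :=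
  h.imp (fun hlt => by intro he; exact absurd (congrArg Prod.fst he) (ne_of_lt hlt))

-- ===== VERDICT (by name: the statement is the Claim_ definition above) =====
theorem dict_intersection_spec : Claim_equal_dict_intersection := by
  intro dict1 dict2 _
  unfold Spec_dict_intersection
  have hA := pvPairwiseA dict1 dict2
  have hB := pvPairwiseB dict1 dict2
  refine List.Perm.eq_of_pairwise (fun a b _ _ h1 h2 => ?_) hA hB ?_
  · exact absurd h2 (not_lt_of_ge (le_of_lt h1))
  · refine (List.perm_ext_iff_of_nodup (pvNodupOfPairwise hA) (pvNodupOfPairwise hB)).mpr ?_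
    intro p
    rw [pvMemA, pvMemB]
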